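-- pv_equiv track=rewrite | github.com/rossdavidh/algebra_for_juliet | parse_text_v2.py | create_puzzle_output
-- ===== SOURCE A (Python) =====
-- def create_puzzle_output(text_string,encoder):
--     new_text_string = ''
--     line_of_blanks  = '<tr >'
--     line_of_cipher  = '<tr>'
--     for char in text_string:
--         if (char == '\n'):
--             new_text_string += line_of_blanks
--             new_text_string += '</tr>'
--             new_text_string += char #eol
--             new_text_string += line_of_cipher
--             new_text_string += '</tr>'
--             new_text_string += char #eol
--             line_of_blanks = '<tr >'
--             line_of_cipher = '<tr>'
--         else:
--             line_of_blanks += '<td>{{ n'+str(encoder[char])+' }}</td>'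
--             line_of_cipher += '<td>'+str(encoder[char])+'</td>'
--     return new_text_string
-- ===== SOURCE B (Python) =====
-- def create_puzzle_output(text_string, encoder):
--     rows = []
--     cells = []
--     for char in text_string:
--         if char == '\n':
--             rows.append(cells)
--             cells = []
--         else:
--             cells.append(str(encoder[char]))
--     return ''.join(
--         '<tr >' + ''.join('<td>{{ n' + v + ' }}</td>' for v in row) + '</tr>\n'
--         + '<tr>' + ''.join('<td>' + v + '</td>' for v in row) + '</tr>\n'
--         for row in rows)
-- ===== Notes on version B (the rewrite author's own statement) =====
-- stated objective: alternative
-- what changed: Replaces A's three incrementally concatenated HTML strings with a scan that collects the encoded cell texts per line into a list of rows, then a separate render phase that joins each row's blank and cipher <tr> lines.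
import Mathlib
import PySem

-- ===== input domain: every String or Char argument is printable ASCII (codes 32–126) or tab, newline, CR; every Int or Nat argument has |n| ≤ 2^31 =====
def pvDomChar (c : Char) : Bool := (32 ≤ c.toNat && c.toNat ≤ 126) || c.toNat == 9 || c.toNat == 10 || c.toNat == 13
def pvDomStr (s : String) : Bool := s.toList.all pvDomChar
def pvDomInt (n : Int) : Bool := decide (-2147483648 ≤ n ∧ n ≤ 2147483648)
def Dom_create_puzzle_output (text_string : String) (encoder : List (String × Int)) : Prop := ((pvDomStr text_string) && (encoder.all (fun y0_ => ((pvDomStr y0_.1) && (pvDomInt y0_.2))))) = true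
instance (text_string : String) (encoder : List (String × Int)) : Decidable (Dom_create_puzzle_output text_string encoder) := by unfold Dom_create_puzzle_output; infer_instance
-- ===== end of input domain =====

-- B replaces A's three incrementally grown HTML strings by a scan that collects the encoded
-- cell texts per line, followed by a separate render-and-join phase (objective: alternative decomposition).

-- ===== PORT A =====
-- encoder[char]: first-match association-list lookup (dict convention); total with default 0 —
-- Pre_ excludes the inputs where Python raises KeyError, so the default is never reached under Pre_.
def pvLookup (encoder : List (String × Int)) (c : Char) : Int :=
  match encoder.find? (fun p => p.1 == String.ofList [c]) with
  | some p => p.2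
  | none => 0

def pvStepA (encoder : List (String × Int)) (st : List Char × List Char × List Char) (ch : Char) :
    List Char × List Char × List Char :=
  if ch = '\n' then
    (st.1 ++ st.2.1 ++ "</tr>".toList ++ [ch] ++ st.2.2 ++ "</tr>".toList ++ [ch],
     "<tr >".toList, "<tr>".toList)
  else
    (st.1,
     st.2.1 ++ "<td>{{ n".toList ++ PySem.Int.toChars (pvLookup encoder ch) ++ " }}</td>".toList,
     st.2.2 ++ "<td>".toList ++ PySem.Int.toChars (pvLookup encoder ch) ++ "</td>".toList)

def create_puzzle_output (text_string : String) (encoder : List (String × Int)) : String :=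
  String.ofList
    ((text_string.toList.foldl (pvStepA encoder) ([], "<tr >".toList, "<tr>".toList)).1)

-- ===== PORT B =====
def pvStepB (encoder : List (String × Int)) (st : List (List (List Char)) × List (List Char)) (ch : Char) :
    List (List (List Char)) × List (List Char) :=
  if ch = '\n' then (st.1 ++ [st.2], [])
  else (st.1, st.2 ++ [PySem.Int.toChars (pvLookup encoder ch)])

def pvRenderRow (row : List (List Char)) : List Char :=
  "<tr >".toList ++ (row.map (fun v => "<td>{{ n".toList ++ v ++ " }}</td>".toList)).flatten
    ++ "</tr>".toList ++ ['\n']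
  ++ "<tr>".toList ++ (row.map (fun v => "<td>".toList ++ v ++ "</td>".toList)).flatten
    ++ "</tr>".toList ++ ['\n']

def create_puzzle_output_alt (text_string : String) (encoder : List (String × Int)) : String :=
  String.ofList
    (((text_string.toList.foldl (pvStepB encoder) ([], [])).1.map pvRenderRow).flatten)

-- ===== PRECONDITION & SPEC =====
-- Pre_ excludes exactly the inputs on which the Python A raises KeyError: a non-newline
-- character of the text that is not a key of the encoder (B raises there too).
def Pre_create_puzzle_output (text_string : String) (encoder : List (String × Int)) : Prop :=
  (text_string.toList.all
    (fun c => c == '\n' || (encoder.map (fun p => p.1.toList)).contains [c])) = true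
instance (text_string : String) (encoder : List (String × Int)) : Decidable (Pre_create_puzzle_output text_string encoder) := by unfold Pre_create_puzzle_output; infer_instance

def pvWitness_create_puzzle_output : String × (List (String × Int)) :=
  ("ab\na\n", [("a", 3), ("b", -2)])

def Spec_create_puzzle_output (text_string : String) (encoder : List (String × Int)) (out : String) : Prop := out = create_puzzle_output_alt text_string encoder
instance (text_string : String) (encoder : List (String × Int)) (out : String) : Decidable (Spec_create_puzzle_output text_string encoder out) := by unfold Spec_create_puzzle_output; infer_instance

-- ===== CLAIM (what is proved, stated in full; the proofs are below) =====
def Claim_equal_create_puzzle_output : Prop := ∀ (text_string : String) (encoder : List (String × Int)), Dom_create_puzzle_output text_string encoder → Pre_create_puzzle_output text_string encoder → Spec_create_puzzle_output text_string encoder (create_puzzle_output text_string encoder)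

-- ===== LEMMAS AND PROOFS =====

-- A's running (result, blanks, cipher) strings are exactly B's rendered rows plus the
-- rendered fragments of B's current row buffer.
theorem pv_inv (encoder : List (String × Int)) (cs : List Char)
    (rows : List (List (List Char))) (cur : List (List Char)) :
    (cs.foldl (pvStepA encoder)
      ((rows.map pvRenderRow).flatten,
       "<tr >".toList ++ (cur.map (fun v => "<td>{{ n".toList ++ v ++ " }}</td>".toList)).flatten,
       "<tr>".toList ++ (cur.map (fun v => "<td>".toList ++ v ++ "</td>".toList)).flatten)).1
    = (((cs.foldl (pvStepB encoder) (rows, cur)).1).map pvRenderRow).flatten := by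
  induction cs generalizing rows cur with
  | nil => simp
  | cons c rest ih =>
    by_cases hc : c = '\n'
    · subst hc
      have h1 := ih (rows ++ [cur]) []
      simp only [List.foldl_cons, pvStepA, pvStepB]
      simpa [pvRenderRow, List.append_assoc] using h1
    · have h1 := ih rows (cur ++ [PySem.Int.toChars (pvLookup encoder c)])
      simp only [List.foldl_cons, pvStepA, pvStepB, if_neg hc]
      simpa [List.append_assoc] using h1

-- ===== VERDICT (by name: the statement is the Claim_ definition above) =====
theorem create_puzzle_output_spec : Claim_equal_create_puzzle_output := by
  intro t e _ _
  unfold Spec_create_puzzle_output create_puzzle_output create_puzzle_output_alt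
  have h := pv_inv e t.toList [] []
  simpa using congrArg String.ofList h
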